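-- pv_equiv track=rewrite | github.com/baballev/DailyCode | 20-02-2020-num34.py | get_right_palindrome
-- ===== SOURCE A (Python) =====
-- def get_right_palindrome(l):
--     index = 0
--     for k in range(1, len(l)):
--         if len(l[k]) == len(l[index]):
--             if l[k] < l[index]: # Check for lexicographic order
--                 index = k
--         elif len(l[k]) < len(l[index]):
--             index = k
--             min_length = len(l[k])
--     return l[index]
-- ===== SOURCE B (Python) =====
-- def get_right_palindrome(l):
--     # Simpler: one stable sort by the composite key (length, string), then take the first element.
--     return sorted(l, key=lambda s: (len(s), s))[0]
-- ===== Notes on version B (the rewrite author's own statement) =====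
-- stated objective: simpler
-- what changed: Replaces the manual index-tracking minimum loop by a single stable sort on the composite key (len(s), s) followed by taking the first element; stability reproduces A's first-occurrence tie-breaking, and indexing [0] raises IndexError on the empty list exactly as A's l[index] does.
import Mathlib
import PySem

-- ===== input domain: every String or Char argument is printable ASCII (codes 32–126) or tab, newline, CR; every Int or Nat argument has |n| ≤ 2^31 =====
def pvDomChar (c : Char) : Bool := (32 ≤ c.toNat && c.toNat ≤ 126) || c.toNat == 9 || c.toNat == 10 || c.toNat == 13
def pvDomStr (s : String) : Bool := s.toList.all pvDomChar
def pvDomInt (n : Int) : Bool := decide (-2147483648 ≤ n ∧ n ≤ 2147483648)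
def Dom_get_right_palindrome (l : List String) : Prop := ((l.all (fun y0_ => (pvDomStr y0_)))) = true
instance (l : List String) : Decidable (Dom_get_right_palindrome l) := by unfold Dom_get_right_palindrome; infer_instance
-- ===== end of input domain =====

-- B replaces A's index-tracking minimum loop by one stable sort on the key (len(s), s) plus head (objective: simpler).

-- ===== PORT A =====
-- Loop indices produced by range(1, len(l)) are always in range, so pyGetD's default is never
-- used there; the final l[index] raises IndexError only on the empty list, excluded by Pre_.
-- (A's local 'min_length' is assigned and never read; it is dropped here.)
def get_right_palindrome (l : List String) : String :=
  let index := (PySem.List.pyRange 1 (PySem.List.len l)).foldl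
    (fun index k =>
      if PySem.Str.len (PySem.List.pyGetD l k "") = PySem.Str.len (PySem.List.pyGetD l index "") then
        if PySem.List.pyGetD l k "" < PySem.List.pyGetD l index "" then k else index
      else if PySem.Str.len (PySem.List.pyGetD l k "") < PySem.Str.len (PySem.List.pyGetD l index "") then k
      else index)
    0
  PySem.List.pyGetD l index ""

-- ===== PORT B =====
-- sorted(l, key=lambda s: (len(s), s)) is PySem.List.sorted2; Python's [0] raises IndexError
-- only on the empty list (excluded by Pre_), so headD's default is never used on Pre_.
def get_right_palindrome_alt (l : List String) : String :=
  (PySem.List.sorted2 l (fun s => PySem.Str.len s) (fun s => s)).headD ""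

-- ===== PRECONDITION & SPEC =====
-- On the empty list both A (l[index]) and B (sorted(...)[0]) raise IndexError.
def Pre_get_right_palindrome (l : List String) : Prop := l ≠ []
instance (l : List String) : Decidable (Pre_get_right_palindrome l) := by unfold Pre_get_right_palindrome; infer_instance
def pvWitness_get_right_palindrome : List String := ["ba", "c", "ab"]

def Spec_get_right_palindrome (l : List String) (out : String) : Prop := out = get_right_palindrome_alt l
instance (l : List String) (out : String) : Decidable (Spec_get_right_palindrome l out) := by unfold Spec_get_right_palindrome; infer_instance

-- ===== CLAIM (what is proved, stated in full; the proofs are below) =====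
def Claim_equal_get_right_palindrome : Prop := ∀ (l : List String), Dom_get_right_palindrome l → Pre_get_right_palindrome l → Spec_get_right_palindrome l (get_right_palindrome l)

-- ===== LEMMAS AND PROOFS =====

-- the value-level step both programs implement: keep m unless x beats it under the key (len, ·)
def pvStep (m x : String) : String :=
  if PySem.Str.len x = PySem.Str.len m then
    if x < m then x else m
  else if PySem.Str.len x < PySem.Str.len m then x
  else m

-- sorted2's comparison at the key (len, ·), as it appears after unfolding sorted2
def pvLt (x m : String) : Bool :=
  decide (PySem.Str.len x < PySem.Str.len m) ||
    (!decide (PySem.Str.len m < PySem.Str.len x) && decide (x < m))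

lemma pvStep_eq_pvLt (m x : String) : pvStep m x = if pvLt x m then x else m := by
  rcases lt_trichotomy x.length m.length with h | h | h
  · simp [pvStep, pvLt, h, Nat.ne_of_lt h]
  · simp [pvStep, pvLt, h]
  · have hle : ¬ x.length ≤ m.length := by omega
    simp [pvStep, pvLt, Nat.ne_of_gt h, hle, Nat.lt_asymm h]

-- A's loop over indices, read through pyGetD, is the value-level fold with pvStep
lemma foldA_val (l : List String) (t : List Int) (i : Int) :
    PySem.List.pyGetD l
      (t.foldl (fun index k =>
        if PySem.Str.len (PySem.List.pyGetD l k "") = PySem.Str.len (PySem.List.pyGetD l index "") then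
          if PySem.List.pyGetD l k "" < PySem.List.pyGetD l index "" then k else index
        else if PySem.Str.len (PySem.List.pyGetD l k "") < PySem.Str.len (PySem.List.pyGetD l index "") then k
        else index) i) ""
    = t.foldl (fun m k => pvStep m (PySem.List.pyGetD l k "")) (PySem.List.pyGetD l i "") := by
  induction t generalizing i with
  | nil => rfl
  | cons k t ih =>
      simp only [List.foldl_cons]
      rw [ih]
      congr 1
      unfold pvStep
      split_ifs <;> rfl

-- reading l through pyGetD along range(a, len(l)) yields l.drop a (fuel = how far a is from the end)
lemma map_pyGetD_pyRange_drop :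
    ∀ (n : Nat) (l : List String) (a : Nat), l.length ≤ a + n →
      (PySem.List.pyRange (a : Int) (PySem.List.len l)).map (fun k => PySem.List.pyGetD l k "") = l.drop a := by
  intro n
  induction n with
  | zero =>
      intro l a h
      have hna : l.length ≤ a := by omega
      have hd := List.drop_eq_nil_of_le hna
      rw [hd]
      simp [pysem]
      omega
  | succ n ih =>
      intro l a h
      by_cases hlt : a < l.length
      · have hab : (a : Int) < PySem.List.len l := by simp [PySem.List.len]; omega
        rw [PySem.List.pyRange_one_cons hab, List.map_cons]
        have h1 : ((a : Int) + 1) = ((a + 1 : Nat) : Int) := by push_cast; ring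
        rw [h1, ih l (a + 1) (by omega)]
        rw [List.drop_eq_getElem_cons hlt]
        simp [pysem, List.getElem?_eq_getElem hlt]
      · have hna : l.length ≤ a := by omega
        have hd := List.drop_eq_nil_of_le hna
        rw [hd]
        simp [pysem]
        omega

-- A on a nonempty list is the value-level running minimum
lemma portA_char (x : String) (xs : List String) :
    get_right_palindrome (x :: xs) = xs.foldl pvStep x := by
  unfold get_right_palindrome
  rw [foldA_val]
  have hmap := map_pyGetD_pyRange_drop (x :: xs).length (x :: xs) 1 (by omega)
  simp only [Nat.cast_one] at hmap
  rw [← List.foldl_map (f := fun k => PySem.List.pyGetD (x :: xs) k ""), hmap]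
  simp only [List.drop_one, List.tail_cons]
  have h0 : PySem.List.pyGetD (x :: xs) 0 "" = x := by simp [pysem]
  rw [h0]

-- head of a stable insertBy-fold starting at h :: r is the running minimum over h, independent of r
lemma head_foldl_insertBy (before : String → String → Bool) :
    ∀ (t : List String) (h : String) (r : List String),
      ∃ r', t.foldl (fun acc x => PySem.List.insertBy before x acc) (h :: r)
        = (t.foldl (fun m x => if before x m then x else m) h) :: r' := by
  intro t
  induction t with
  | nil => intro h r; exact ⟨r, rfl⟩
  | cons x t ih =>
      intro h r
      simp only [List.foldl_cons]
      have hins : PySem.List.insertBy before x (h :: r)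
          = if before x h then x :: h :: r else h :: PySem.List.insertBy before x r := by
        simp [PySem.List.insertBy]
      rw [hins]
      by_cases hb : before x h
      · simp only [hb, if_true]
        exact ih x (h :: r)
      · simp only [hb, if_false, Bool.false_eq_true]
        exact ih h (PySem.List.insertBy before x r)

-- B on a nonempty list is the same running minimum
lemma portB_char (x : String) (xs : List String) :
    get_right_palindrome_alt (x :: xs) = xs.foldl pvStep x := by
  unfold get_right_palindrome_alt PySem.List.sorted2
  simp only [List.foldl_cons]
  have h1 : PySem.List.insertBy
      (fun a b => decide (PySem.Str.len a < PySem.Str.len b) ||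
        (!decide (PySem.Str.len b < PySem.Str.len a) && decide (a < b))) x [] = [x] := by
    simp [PySem.List.insertBy]
  rw [if_neg (by simp), h1]
  obtain ⟨r', hr⟩ := head_foldl_insertBy
    (fun a b => decide (PySem.Str.len a < PySem.Str.len b) ||
      (!decide (PySem.Str.len b < PySem.Str.len a) && decide (a < b))) xs x []
  rw [hr, List.headD_cons]
  apply PySem.List.foldl_congr_mem  -- replace comparison-form step by pvStep pointwise
  intro m y _
  exact (pvStep_eq_pvLt m y).symm

-- ===== VERDICT (by name: the statement is the Claim_ definition above) =====
theorem get_right_palindrome_spec : Claim_equal_get_right_palindrome := by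
  intro l _ hpre
  unfold Spec_get_right_palindrome
  cases l with
  | nil => exact absurd rfl hpre
  | cons x xs => rw [portA_char, portB_char]
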